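-- pv_equiv track=rewrite | github.com/Muzzh/Codefights | TheCore/AtTheCrossroads/MetroCard.py | metroCard
-- ===== SOURCE A (Python) =====
-- def metroCard(lastNumberOfDays):
--     days = [31,28,31,30,31,30,31,31,30,31,30,31,31]
--     index = []
--     for i, v in enumerate(days):
--         if v == lastNumberOfDays and i < 12:
--             index.append(i)
--     new = [days[x+1] for x in index]
--     answer = []
--     for i in new:
--         if i not in answer:
--             answer.append(i)
--     return answer
-- ===== SOURCE B (Python) =====
-- def metroCard(lastNumberOfDays):
--     days = [31,28,31,30,31,30,31,31,30,31,30,31,31]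
--     table = {}
--     for i in range(12):
--         nxt = days[i + 1]
--         lst = table.setdefault(days[i], [])
--         if nxt not in lst:
--             lst.append(nxt)
--     return list(table.get(lastNumberOfDays, []))
-- ===== Notes on version B (the rewrite author's own statement) =====
-- stated objective: simpler
-- what changed: B replaces A's three sequential passes (filter indices, map to successors, dedupe) with one pass over adjacent day pairs building a dict from month length to its distinct following lengths, then a single lookup.
import Mathlib
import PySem

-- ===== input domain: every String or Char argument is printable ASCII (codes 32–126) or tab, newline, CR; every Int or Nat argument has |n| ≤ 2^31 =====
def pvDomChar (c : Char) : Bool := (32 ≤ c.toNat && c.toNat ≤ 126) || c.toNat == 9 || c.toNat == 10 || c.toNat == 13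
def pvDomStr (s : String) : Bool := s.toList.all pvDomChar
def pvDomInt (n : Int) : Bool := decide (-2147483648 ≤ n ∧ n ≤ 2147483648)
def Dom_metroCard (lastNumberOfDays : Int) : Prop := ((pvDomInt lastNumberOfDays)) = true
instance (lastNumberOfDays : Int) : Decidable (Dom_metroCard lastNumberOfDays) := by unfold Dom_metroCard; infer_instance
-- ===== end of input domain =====

-- B builds a month-length → distinct-next-lengths dict in one pass and looks the answer up; same value, simpler shape.

-- ===== PORT A =====
-- A's three passes: collect matching indices, map each index to days[x+1]
-- (always in range since i < 12, so the pyGet? is total here; getD 0 is never hit), dedupe in order.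
def metroCard (lastNumberOfDays : Int) : List Int :=
  let days : List Int := [31,28,31,30,31,30,31,31,30,31,30,31,31]
  let index : List Int :=
    (PySem.List.enumerate days).foldl
      (fun acc iv => if iv.2 = lastNumberOfDays ∧ iv.1 < 12 then acc ++ [iv.1] else acc) []
  let new : List Int := index.map (fun x => (PySem.List.pyGet? days (x + 1)).getD 0)
  new.foldl (fun answer i => if i ∈ answer then answer else answer ++ [i]) []

-- ===== PORT B =====
def metroCard_alt (lastNumberOfDays : Int) : List Int :=
  let days : List Int := [31,28,31,30,31,30,31,31,30,31,30,31,31]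
  let table : PySem.Dict Int (List Int) :=
    (PySem.List.pyRange 0 12 1).foldl
      (fun t i =>
        let nxt := (PySem.List.pyGet? days (i + 1)).getD 0
        let lst := t.getD ((PySem.List.pyGet? days i).getD 0) []
        if nxt ∈ lst then t
        else t.insert ((PySem.List.pyGet? days i).getD 0) (lst ++ [nxt]))
      (PySem.Dict.empty)
  table.getD lastNumberOfDays []

-- ===== PRECONDITION & SPEC =====
def Spec_metroCard (lastNumberOfDays : Int) (out : List Int) : Prop := out = metroCard_alt lastNumberOfDays
instance (lastNumberOfDays : Int) (out : List Int) : Decidable (Spec_metroCard lastNumberOfDays out) := by unfold Spec_metroCard; infer_instance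

-- ===== CLAIM (what is proved, stated in full; the proofs are below) =====
def Claim_equal_metroCard : Prop := ∀ (lastNumberOfDays : Int), Dom_metroCard lastNumberOfDays → Spec_metroCard lastNumberOfDays (metroCard lastNumberOfDays)

-- ===== LEMMAS AND PROOFS =====
theorem metroCard_cases (d : Int) (h28 : d ≠ 28) (h30 : d ≠ 30) (h31 : d ≠ 31) :
    metroCard d = [] ∧ metroCard_alt d = [] := by
  have e28 : ¬((28 : Int) = d) := fun h => h28 h.symm
  have e30 : ¬((30 : Int) = d) := fun h => h30 h.symm
  have e31 : ¬((31 : Int) = d) := fun h => h31 h.symm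
  constructor
  · simp [metroCard, PySem.List.enumerate, e28, e30, e31]
  · have htab : metroCard_alt d =
        PySem.Dict.getD ⟨[((31 : Int), ([28, 30, 31] : List Int)), (28, [31]), (30, [31])]⟩ d [] := rfl
    rw [htab]
    simp [PySem.Dict.getD, PySem.Dict.get?, e28, e30, e31]

-- ===== VERDICT (by name: the statement is the Claim_ definition above) =====
theorem metroCard_spec : Claim_equal_metroCard := by
  intro d _
  unfold Spec_metroCard
  by_cases h28 : d = 28
  · subst h28; decide
  by_cases h30 : d = 30
  · subst h30; decide
  by_cases h31 : d = 31
  · subst h31; decide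
  have := metroCard_cases d h28 h30 h31
  rw [this.1, this.2]
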